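-- pv_equiv track=rewrite | github.com/mihikabairathi/advent-of-code-2017 | day6.py | num_redistributions
-- ===== SOURCE A (Python) =====
-- def redistribute(banks):
--     # banks is a list of block counts
--     max_banks = max(banks)
--     max_index = banks.index(max_banks)
--     banks[max_index] = 0
--
--     each_block_increment = max_banks // len(banks)
--     banks = [blocks + each_block_increment for blocks in banks]
--
--     remainder = max_banks % len(banks)
--     for i in range(1, remainder + 1):
--         banks[(max_index + i) % len(banks)] += 1
--
--     return banks
--
-- def num_redistributions(banks):
--     # banks is a list of block counts
--     MAX_ITERATIONS = 1000000  # Safety limit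
--     seen_configs = {}
--     iteration = 0
--
--     while iteration < MAX_ITERATIONS:
--         # Use tuple of banks as key for faster lookup
--         config = tuple(banks)
--         if config in seen_configs:
--             return iteration - seen_configs[config], iteration
--         seen_configs[config] = iteration
--         banks = redistribute(banks)
--         iteration += 1
--
--     raise Exception(f"Exceeded maximum iterations ({MAX_ITERATIONS}) without finding a repeat")
-- ===== SOURCE B (Python) =====
-- def redistribute(banks):
--     # rebuild the list in one pass: everyone gets the floor share, the first
--     # r cyclic successors of the max bank get one extra block
--     n = len(banks)
--     m = max(banks)
--     mi = banks.index(m)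
--     q, r = divmod(m, n)
--     return [q + (0 if j == mi else b + (1 if (j - mi) % n <= r else 0))
--             for j, b in enumerate(banks)]
--
-- def num_redistributions(banks):
--     MAX_ITERATIONS = 1000000  # Safety limit
--     seen = set()
--     config = tuple(banks)
--     for iteration in range(MAX_ITERATIONS):
--         if config in seen:
--             # config is the first repeated state: measure its cycle length
--             # by walking the loop once
--             length = 1
--             cur = tuple(redistribute(list(config)))
--             while cur != config:
--                 cur = tuple(redistribute(list(cur)))
--                 length += 1
--             return length, iteration
--         seen.add(config)
--         config = tuple(redistribute(list(config)))
--     raise Exception(f"Exceeded maximum iterations ({MAX_ITERATIONS}) without finding a repeat")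
-- ===== Notes on version B (the rewrite author's own statement) =====
-- stated objective: alternative
-- what changed: Cycle detection keeps only a set of seen configs (no stored indices) and obtains the loop length by walking the cycle once from the first repeated config, and the redistribution step is rebuilt in one enumerate-comprehension with a closed-form cyclic-offset test instead of zeroing in place, mapping, and a remainder loop.
import Mathlib
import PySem

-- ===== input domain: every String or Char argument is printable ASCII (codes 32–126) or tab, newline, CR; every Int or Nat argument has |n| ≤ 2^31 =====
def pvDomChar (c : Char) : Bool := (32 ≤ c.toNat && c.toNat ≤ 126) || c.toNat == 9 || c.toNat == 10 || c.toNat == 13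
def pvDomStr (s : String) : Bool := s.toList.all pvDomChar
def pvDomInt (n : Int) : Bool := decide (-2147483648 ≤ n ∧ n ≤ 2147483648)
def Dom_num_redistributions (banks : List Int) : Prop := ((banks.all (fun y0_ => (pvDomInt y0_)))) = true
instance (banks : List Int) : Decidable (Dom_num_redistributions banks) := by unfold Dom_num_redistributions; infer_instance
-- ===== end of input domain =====

-- B replaces A's dict-of-first-indices cycle detection by a seen-set plus one extra walk
-- around the cycle to measure its length, and rebuilds the redistribution step as a single
-- enumerate-comprehension (alternative decomposition, not claimed faster).  Return-value
-- equivalence only: Python A zeroes the caller's max bank in place on the first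
-- redistribution; B does not mutate its argument.

-- ===== PORT A =====
-- loop body of A's remainder loop: banks[(max_index + i) % len(banks)] += 1
-- (the index is (mi+i) % n ∈ [0, n), so List.set / getD with default are exact here)
def nrBump (mi : Nat) (acc : List Int) (i : Int) : List Int :=
  let e := (PySem.Int.mod ((mi : Int) + i) (acc.length : Int)).toNat
  acc.set e (acc.getD e 0 + 1)

def redistribute (banks : List Int) : List Int :=
  match PySem.List.max? banks (fun y => y) with
  | none => []        -- max([]) raises ValueError in Python: excluded by Pre_
  | some m =>
    match PySem.List.index? banks m with
    | none => []      -- unreachable: m ∈ banks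
    | some mi =>
      let banks1 := banks.set mi 0
      let q := PySem.Int.floordiv m (banks1.length : Int)
      let banks2 := banks1.map (fun blocks => blocks + q)
      let r := PySem.Int.mod m (banks2.length : Int)
      (PySem.List.pyRange 1 (r + 1)).foldl (nrBump mi) banks2

-- the while-loop of A; fuel = remaining iterations of 'while iteration < MAX_ITERATIONS';
-- at fuel 0 Python raises Exception (safety limit), the port returns the sentinel (0, 0)
def nrLoopA (fuel : Nat) (seen : PySem.Dict (List Int) Int) (iteration : Int)
    (banks : List Int) : Int × Int :=
  match fuel with
  | 0 => (0, 0)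
  | fuel' + 1 =>
    match seen.get? banks with
    | some j => (iteration - j, iteration)
    | none => nrLoopA fuel' (seen.insert banks iteration) (iteration + 1) (redistribute banks)

def num_redistributions (banks : List Int) : Int × Int :=
  nrLoopA 1000000 PySem.Dict.empty 0 banks

-- ===== PORT B =====
def redistribute_alt (banks : List Int) : List Int :=
  match PySem.List.max? banks (fun y => y) with
  | none => []        -- max([]) raises ValueError in Python: excluded by Pre_
  | some m =>
    match PySem.List.index? banks m with
    | none => []      -- unreachable: m ∈ banks
    | some mi =>
      let n : Int := (banks.length : Int)
      let q := PySem.Int.floordiv m n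
      let r := PySem.Int.mod m n
      (PySem.List.enumerate banks).map (fun jb =>
        if jb.1 = (mi : Int) then q
        else q + jb.2 + (if PySem.Int.mod (jb.1 - (mi : Int)) n ≤ r then 1 else 0))

-- B's 'for iteration in range(MAX_ITERATIONS)' detection loop; none = the raise branch
def nrFindRepeat (fuel : Nat) (seen : PySem.Set (List Int)) (iteration : Int)
    (config : List Int) : Option (Int × List Int) :=
  match fuel with
  | 0 => none
  | fuel' + 1 =>
    if seen.contains config then some (iteration, config)
    else nrFindRepeat fuel' (seen.add config) (iteration + 1) (redistribute_alt config)

-- B's 'while cur != config' walk around the cycle; the fuel only bounds Python's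
-- unbounded while and is never exhausted when phase 1 found a repeat within its fuel
def nrCycleLen (fuel : Nat) (target cur : List Int) (length : Int) : Int :=
  match fuel with
  | 0 => length
  | fuel' + 1 =>
    if cur = target then length
    else nrCycleLen fuel' target (redistribute_alt cur) (length + 1)

def num_redistributions_alt (banks : List Int) : Int × Int :=
  match nrFindRepeat 1000000 PySem.Set.empty 0 banks with
  | some tc => (nrCycleLen 1000000 tc.2 (redistribute_alt tc.2) 1, tc.1)
  | none => (0, 0)

-- ===== PRECONDITION & SPEC =====
-- Pre_ excludes only the empty list, on which Python A raises ValueError (max of empty);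
-- the Lean equivalence itself happens to hold there too, so the proof does not consume it
def Pre_num_redistributions (banks : List Int) : Prop := banks ≠ []
instance (banks : List Int) : Decidable (Pre_num_redistributions banks) := by
  unfold Pre_num_redistributions; infer_instance

def pvWitness_num_redistributions : List Int := [0, 2, 7, 0]

def Spec_num_redistributions (banks : List Int) (out : Int × Int) : Prop := out = num_redistributions_alt banks
instance (banks : List Int) (out : Int × Int) : Decidable (Spec_num_redistributions banks out) := by unfold Spec_num_redistributions; infer_instance

-- ===== CLAIM (what is proved, stated in full; the proofs are below) =====
def Claim_equal_num_redistributions : Prop := ∀ (banks : List Int), Dom_num_redistributions banks → Pre_num_redistributions banks → Spec_num_redistributions banks (num_redistributions banks)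

-- ===== LEMMAS AND PROOFS =====

-- a multiple of n strictly between -n and n is zero
lemma dvd_small_eq_zero (n d : Int) (hn : 0 < n) (hd : n ∣ d) (h1 : -n < d) (h2 : d < n) :
    d = 0 := by
  obtain ⟨c, rfl⟩ := hd
  rcases lt_trichotomy c 0 with h | h | h
  · nlinarith
  · simp [h]
  · nlinarith

-- n divides a - a % n
lemma dvd_sub_emod (a n : Int) : n ∣ (a - a % n) :=
  ⟨a / n, by rw [Int.emod_def]; ring⟩

lemma nrBump_fold_len (mi : Nat) (ks : List Int) (l : List Int) :
    (ks.foldl (nrBump mi) l).length = l.length := by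
  induction ks generalizing l with
  | nil => rfl
  | cons k ks ih => simp [List.foldl_cons, ih, nrBump]

lemma nrBump_fold_elem (n : Nat) (hn : 0 < n) (mi : Nat) :
    ∀ (k : Nat), k < n → ∀ (l : List Int), l.length = n → ∀ (j : Nat), j < n →
      ((PySem.List.pyRange 1 ((k : Int) + 1)).foldl (nrBump mi) l).getD j 0
        = l.getD j 0 +
          (if 1 ≤ ((j : Int) - (mi : Int)) % (n : Int) ∧
              ((j : Int) - (mi : Int)) % (n : Int) ≤ (k : Int) then 1 else 0) := by
  intro k
  induction k with
  | zero =>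
    intro _ l hl j hj
    have h0 : PySem.List.pyRange 1 ((0 : Nat) + 1) = [] := by decide
    rw [h0]
    simp only [List.foldl_nil, Nat.cast_zero]
    rw [if_neg (by
      generalize ((j : Int) - (mi : Int)) % (n : Int) = X
      omega)]
    omega
  | succ k ih =>
    intro hk l hl j hj
    have ihl := ih (by omega) l hl
    have hn' : (0 : Int) < (n : Int) := by exact_mod_cast hn
    have hcast : ((k + 1 : Nat) : Int) + 1 = ((k : Int) + 1) + 1 := by push_cast; ring
    rw [hcast, PySem.List.pyRange_one_succ_right (by omega : (1 : Int) ≤ (k : Int) + 1),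
        List.foldl_append, List.foldl_cons, List.foldl_nil]
    set L := (PySem.List.pyRange 1 ((k : Int) + 1)).foldl (nrBump mi) l with hLdef
    have hLlen : L.length = n := by rw [hLdef, nrBump_fold_len, hl]
    show (nrBump mi L ((k : Int) + 1)).getD j 0 = _
    unfold nrBump
    rw [hLlen, PySem.Int.mod_eq_emod_of_pos hn']
    set E := ((mi : Int) + ((k : Int) + 1)) % (n : Int) with hEdef
    have hE0 : 0 ≤ E := Int.emod_nonneg _ (by omega)
    have hEn : E < (n : Int) := Int.emod_lt_of_pos _ hn'
    have hEt : ((E.toNat : Nat) : Int) = E := Int.toNat_of_nonneg hE0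
    have hEdvd : (n : Int) ∣ ((mi : Int) + ((k : Int) + 1) - E) := dvd_sub_emod _ _
    rw [List.getD_eq_getElem _ _ (by rw [List.length_set, hLlen]; omega),
        List.getElem_set]
    set t := ((j : Int) - (mi : Int)) % (n : Int) with htdef
    have ht0 : 0 ≤ t := Int.emod_nonneg _ (by omega)
    have htn : t < (n : Int) := Int.emod_lt_of_pos _ hn'
    have htdvd : (n : Int) ∣ ((j : Int) - (mi : Int) - t) := dvd_sub_emod _ _
    have key : E.toNat = j ↔ t = (k : Int) + 1 := by
      constructor
      · intro h
        have hEj : E = (j : Int) := by omega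
        have hsum := dvd_add hEdvd htdvd
        have heq2 : ((mi : Int) + ((k : Int) + 1) - E) + ((j : Int) - (mi : Int) - t)
            = ((k : Int) + 1) - t := by rw [hEj]; ring
        rw [heq2] at hsum
        have := dvd_small_eq_zero (n : Int) _ hn' hsum (by omega) (by omega)
        omega
      · intro h
        have hsum := dvd_add hEdvd htdvd
        have heq2 : ((mi : Int) + ((k : Int) + 1) - E) + ((j : Int) - (mi : Int) - t)
            = (j : Int) - E := by rw [h]; ring
        rw [heq2] at hsum
        have := dvd_small_eq_zero (n : Int) _ hn' hsum (by omega) (by omega)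
        omega
    by_cases hEj : E.toNat = j
    · rw [if_pos hEj, hEj, ihl j hj]
      have hkey := key.mp hEj
      split_ifs <;> omega
    · rw [if_neg hEj, ← List.getD_eq_getElem L 0 (by omega), ihl j hj]
      have hkey : ¬ (t = (k : Int) + 1) := fun h => hEj (key.mpr h)
      split_ifs <;> omega

lemma map_enumerate_getD (f : Int → Int → Int) :
    ∀ (xs : List Int) (s : Int) (j : Nat), j < xs.length →
      ((PySem.List.enumerate xs s).map (fun jb => f jb.1 jb.2)).getD j 0
        = f (s + (j : Int)) (xs.getD j 0) := by
  intro xs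
  induction xs with
  | nil => intro s j hj; simp at hj
  | cons x t ih =>
    intro s j hj
    cases j with
    | zero => simp [PySem.List.enumerate]
    | succ j =>
      have := ih (s + 1) j (by simpa using hj)
      simp only [PySem.List.enumerate, List.map_cons, List.getD_cons_succ]
      rw [this]
      congr 1
      push_cast
      ring

lemma redistribute_alt_eq (b : List Int) : redistribute_alt b = redistribute b := by
  unfold redistribute redistribute_alt
  cases hm : PySem.List.max? b (fun y => y) with
  | none => rfl
  | some m =>
    cases hi : PySem.List.index? b m with
    | none =>
      exact absurd (PySem.List.max?_mem hm) ((PySem.List.index?_eq_none_iff b m).mp hi)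
    | some mi =>
      obtain ⟨hmi, hbm, hprev⟩ := PySem.List.getElem_of_index?_eq_some hi
      simp only [hi]
      set n := b.length with hndef
      have hn : 0 < n := by omega
      have hn' : (0 : Int) < (n : Int) := by exact_mod_cast hn
      set q := PySem.Int.floordiv m ((n : Nat) : Int) with hqdef
      have hlen1 : (b.set mi 0).length = n := by rw [List.length_set]
      have hlen2 : ((b.set mi 0).map (fun blocks => blocks + PySem.Int.floordiv m (((b.set mi 0).length : Nat) : Int))).length = n := by
        rw [List.length_map, hlen1]
      set r := PySem.Int.mod m ((n : Nat) : Int) with hrdef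
      have hr0 : 0 ≤ r := PySem.Int.mod_nonneg m hn'
      have hrn : r < (n : Int) := PySem.Int.mod_lt m hn'
      have hrt : ((r.toNat : Nat) : Int) = r := Int.toNat_of_nonneg hr0
      apply List.ext_getElem
      · rw [List.length_map, PySem.List.length_enumerate, nrBump_fold_len, hlen2]
      · intro j hjl hjr
        have hj : j < n := by
          rw [List.length_map, PySem.List.length_enumerate] at hjl; exact hjl
        rw [← List.getD_eq_getElem _ 0 hjl, ← List.getD_eq_getElem _ 0 hjr]
        -- left side: B's enumerate comprehension
        rw [map_enumerate_getD
          (fun idx v => if idx = (mi : Int) then q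
            else q + v + (if PySem.Int.mod (idx - (mi : Int)) ((n : Nat) : Int) ≤ r then 1 else 0))
          b 0 j hj]
        -- right side: A's fold, via the elementwise fold lemma
        have hfold := nrBump_fold_elem n hn mi r.toNat (by omega)
          ((b.set mi 0).map (fun blocks => blocks + PySem.Int.floordiv m (((b.set mi 0).length : Nat) : Int)))
          hlen2 j hj
        rw [hrt] at hfold
        rw [hlen2, hfold]
        have hbase :
            ((b.set mi 0).map
              (fun blocks => blocks + PySem.Int.floordiv m (((b.set mi 0).length : Nat) : Int))).getD j 0
              = (if mi = j then 0 else b.getD j 0) + q := by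
          rw [List.getD_eq_getElem _ 0 (by rw [List.length_map, hlen1]; exact hj),
              List.getElem_map, List.getElem_set,
              List.getD_eq_getElem b 0 (show j < b.length by omega)]
          have hfl : PySem.Int.floordiv m (((b.set mi 0).length : Nat) : Int) = q := by
            rw [List.length_set, ← hndef, ← hqdef]
          rw [hfl]
        rw [hbase]
        simp only [zero_add]
        rw [PySem.Int.mod_eq_emod_of_pos hn']
        set t := ((j : Int) - (mi : Int)) % (n : Int) with htdef
        have ht0 : 0 ≤ t := Int.emod_nonneg _ (by omega)
        have htn : t < (n : Int) := Int.emod_lt_of_pos _ hn'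
        have htdvd : (n : Int) ∣ ((j : Int) - (mi : Int) - t) := dvd_sub_emod _ _
        have hiff : t = 0 ↔ ((j : Int) = (mi : Int)) := by
          constructor
          · intro h
            rw [h, sub_zero] at htdvd
            have := dvd_small_eq_zero (n : Int) _ hn' htdvd (by omega) (by omega)
            omega
          · intro h
            rw [htdef, h, sub_self, Int.zero_emod]
        split_ifs <;> omega

lemma nrCycleLen_eq (c : List Int) :
    ∀ (fuel : Nat) (j d : Nat), 1 ≤ j → j ≤ d →
      redistribute^[d] c = c →
      (∀ e : Nat, 0 < e → e < d → redistribute^[e] c ≠ c) →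
      d - j < fuel →
      nrCycleLen fuel c (redistribute^[j] c) (j : Int) = (d : Int) := by
  intro fuel
  induction fuel with
  | zero => intro j d _ _ _ _ h5; exact absurd h5 (by omega)
  | succ fuel ih =>
    intro j d h1 h2 hcyc hmin hlt
    show (if redistribute^[j] c = c then ((j : Nat) : Int)
          else nrCycleLen fuel c (redistribute_alt (redistribute^[j] c)) ((j : Int) + 1)) = (d : Int)
    by_cases hc : redistribute^[j] c = c
    · rw [if_pos hc]
      have hjd : j = d := by
        by_contra hne
        exact hmin j (by omega) (by omega) hc
      rw [hjd]
    · rw [if_neg hc]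
      have hjd : j ≠ d := fun h => hc (h ▸ hcyc)
      have hstep : redistribute_alt (redistribute^[j] c) = redistribute^[j + 1] c := by
        rw [redistribute_alt_eq]
        exact (Function.iterate_succ_apply' redistribute j c).symm
      rw [hstep]
      have hrec := ih (j + 1) d (by omega) (by omega) hcyc hmin (by omega)
      have hcast : (((j + 1 : Nat)) : Int) = (j : Int) + 1 := by push_cast; ring
      rw [hcast] at hrec
      exact hrec

lemma nrLockstep (b0 : List Int) :
    ∀ (fuel i : Nat) (seen : PySem.Dict (List Int) Int) (sset : PySem.Set (List Int)),
      i + fuel ≤ 1000000 →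
      (∀ a b : Nat, a < b → b < i → redistribute^[a] b0 ≠ redistribute^[b] b0) →
      (∀ (x : List Int) (v : Int), seen.get? x = some v ↔
        ∃ j : Nat, j < i ∧ redistribute^[j] b0 = x ∧ v = (j : Int)) →
      (∀ x : List Int, x ∈ sset ↔ ∃ j : Nat, j < i ∧ redistribute^[j] b0 = x) →
      nrLoopA fuel seen (i : Int) (redistribute^[i] b0) =
        (match nrFindRepeat fuel sset (i : Int) (redistribute^[i] b0) with
         | some tc => (nrCycleLen 1000000 tc.2 (redistribute_alt tc.2) 1, tc.1)
         | none => ((0 : Int), (0 : Int))) := by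
  intro fuel
  induction fuel with
  | zero => intro i seen sset _ _ _ _; rfl
  | succ fuel ih =>
    intro i seen sset hbound hd hget hset
    cases hx : seen.get? (redistribute^[i] b0) with
    | some v =>
      obtain ⟨j0, hj0i, hj0x, hv⟩ := (hget _ v).mp hx
      have hmem : redistribute^[i] b0 ∈ sset := (hset _).mpr ⟨j0, hj0i, hj0x⟩
      have htrue_iff : sset.contains (redistribute^[i] b0) = true ↔
          redistribute^[i] b0 ∈ sset := by simp [pysem]
      have hcon : sset.contains (redistribute^[i] b0) = true := htrue_iff.mpr hmem
      show (match seen.get? (redistribute^[i] b0) with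
            | some j => ((i : Int) - j, (i : Int))
            | none => nrLoopA fuel (seen.insert (redistribute^[i] b0) (i : Int))
                ((i : Int) + 1) (redistribute (redistribute^[i] b0))) = _
      rw [hx]
      show ((i : Int) - v, (i : Int)) =
        (match (if sset.contains (redistribute^[i] b0) = true
                then some ((i : Int), redistribute^[i] b0)
                else nrFindRepeat fuel (sset.add (redistribute^[i] b0)) ((i : Int) + 1)
                  (redistribute_alt (redistribute^[i] b0))) with
         | some tc => (nrCycleLen 1000000 tc.2 (redistribute_alt tc.2) 1, tc.1)
         | none => ((0 : Int), (0 : Int)))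
      rw [if_pos hcon]
      have hd1 : 1 ≤ i - j0 := by omega
      have hcyc : redistribute^[i - j0] (redistribute^[i] b0) = redistribute^[i] b0 := by
        conv_lhs => rw [← hj0x]
        rw [← Function.iterate_add_apply]
        congr 1
        omega
      have hmin : ∀ e : Nat, 0 < e → e < i - j0 →
          redistribute^[e] (redistribute^[i] b0) ≠ redistribute^[i] b0 := by
        intro e he hed heq
        apply hd j0 (e + j0) (by omega) (by omega)
        have : redistribute^[e + j0] b0 = redistribute^[e] (redistribute^[i] b0) := by
          rw [Function.iterate_add_apply, hj0x]
        rw [this, heq, ← hj0x]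
      have hclen := nrCycleLen_eq (redistribute^[i] b0) 1000000 1 (i - j0)
        (le_refl 1) (by omega) hcyc hmin (by omega)
      have hstep1 : redistribute^[1] (redistribute^[i] b0) =
          redistribute_alt (redistribute^[i] b0) := by
        rw [redistribute_alt_eq, Function.iterate_one]
      rw [hstep1] at hclen
      have h1 : ((1 : Nat) : Int) = (1 : Int) := by norm_num
      rw [h1] at hclen
      show ((i : Int) - v, (i : Int)) = (nrCycleLen 1000000 (redistribute^[i] b0)
        (redistribute_alt (redistribute^[i] b0)) 1, (i : Int))
      rw [hclen, hv]
      have hsub : ((i - j0 : Nat) : Int) = (i : Int) - (j0 : Int) := by omega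
      rw [hsub]
    | none =>
      have hnmem : redistribute^[i] b0 ∉ sset := by
        intro hmem
        obtain ⟨j0, hj, hx0⟩ := (hset _).mp hmem
        have := (hget _ ((j0 : Nat) : Int)).mpr ⟨j0, hj, hx0, rfl⟩
        rw [hx] at this
        simp at this
      have htrue_iff : sset.contains (redistribute^[i] b0) = true ↔
          redistribute^[i] b0 ∈ sset := by simp [pysem]
      show (match seen.get? (redistribute^[i] b0) with
            | some j => ((i : Int) - j, (i : Int))
            | none => nrLoopA fuel (seen.insert (redistribute^[i] b0) (i : Int))
                ((i : Int) + 1) (redistribute (redistribute^[i] b0))) = _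
      rw [hx]
      show nrLoopA fuel (seen.insert (redistribute^[i] b0) (i : Int))
          ((i : Int) + 1) (redistribute (redistribute^[i] b0)) =
        (match (if sset.contains (redistribute^[i] b0) = true
                then some ((i : Int), redistribute^[i] b0)
                else nrFindRepeat fuel (sset.add (redistribute^[i] b0)) ((i : Int) + 1)
                  (redistribute_alt (redistribute^[i] b0))) with
         | some tc => (nrCycleLen 1000000 tc.2 (redistribute_alt tc.2) 1, tc.1)
         | none => ((0 : Int), (0 : Int)))
      rw [if_neg (fun hcc => hnmem (htrue_iff.mp hcc))]
      have hsucc : redistribute (redistribute^[i] b0) = redistribute^[i + 1] b0 :=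
        (Function.iterate_succ_apply' redistribute i b0).symm
      have hcast : ((i : Int) + 1) = (((i + 1 : Nat)) : Int) := by push_cast; ring
      rw [redistribute_alt_eq, hsucc, hcast]
      apply ih (i + 1)
      · omega
      · intro a b hab hb
        by_cases hbi : b < i
        · exact hd a b hab hbi
        · have hbeq : b = i := by omega
          subst hbeq
          intro heq
          have := (hget _ ((a : Nat) : Int)).mpr ⟨a, hab, heq, rfl⟩
          rw [hx] at this
          simp at this
      · intro x' v
        rw [PySem.Dict.get?_insert]
        by_cases hx' : x' = redistribute^[i] b0
        · rw [if_pos hx']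
          constructor
          · intro h
            have hv : v = (i : Int) := by injection h with h'; omega
            exact ⟨i, by omega, hx'.symm, hv⟩
          · rintro ⟨j, hj, hjx, hv⟩
            have hji : j = i := by
              by_contra hne
              have h2 : redistribute^[j] b0 = redistribute^[i] b0 := by rw [hjx, hx']
              have hcontra := (hget _ ((j : Nat) : Int)).mpr ⟨j, by omega, h2, rfl⟩
              rw [hx] at hcontra
              simp at hcontra
            subst hji
            rw [hv]
        · rw [if_neg hx']
          rw [hget x' v]
          constructor
          · rintro ⟨j, hj, hjx, hv⟩
            exact ⟨j, by omega, hjx, hv⟩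
          · rintro ⟨j, hj, hjx, hv⟩
            refine ⟨j, ?_, hjx, hv⟩
            by_contra hne
            have hji : j = i := by omega
            subst hji
            exact hx' hjx.symm
      · intro x'
        rw [PySem.Set.mem_add]
        constructor
        · rintro (hmem | hxe)
          · obtain ⟨j, hj, hjx⟩ := (hset x').mp hmem
            exact ⟨j, by omega, hjx⟩
          · exact ⟨i, by omega, hxe.symm⟩
        · rintro ⟨j, hj, hjx⟩
          by_cases hji : j < i
          · exact Or.inl ((hset x').mpr ⟨j, hji, hjx⟩)
          · have : j = i := by omega
            subst this
            exact Or.inr hjx.symm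

-- ===== VERDICT (by name: the statement is the Claim_ definition above) =====
theorem num_redistributions_spec : Claim_equal_num_redistributions := by
  intro banks _ _
  unfold Spec_num_redistributions num_redistributions num_redistributions_alt
  have h := nrLockstep banks 1000000 0 PySem.Dict.empty PySem.Set.empty
    (by omega)
    (by intro a b _ hb; omega)
    (by intro x v; simp [PySem.Dict.get?_empty])
    (by intro x; simp [PySem.Set.empty])
  simpa using h
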